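-- pv_equiv track=rewrite | github.com/kimdora/NPFuzz | src/npfuzz/dependency.py | dfs
-- ===== SOURCE A (Python) =====
-- def dfs(visited, graph, s, stack, seq_set):
--   if not s in graph:
--     return seq_set
--   visited.append(s)
--
--   for v in graph[s]:
--     stack.append(v)
--     tmp = list(stack)
--     seq_set = seq_set + [tmp]
--
--     if not v in visited and v in graph:
--       seq_set = dfs(visited, graph, v, stack, seq_set)
--       stack.pop()
--     else:
--       stack.pop()
--   return seq_set
-- ===== SOURCE B (Python) =====
-- def dfs(visited, graph, s, stack, seq_set):
--   if s not in graph: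
--     return seq_set
--   visited.append(s)
--   out = list(seq_set)
--   frames = [(graph[s], 0)]
--   while frames:
--     ch, i = frames[-1]
--     if i < len(ch):
--       frames[-1] = (ch, i + 1)
--       v = ch[i]
--       stack.append(v)
--       out.append(list(stack))
--       if v not in visited and v in graph:
--         visited.append(v)
--         frames.append((graph[v], 0))
--       else:
--         stack.pop()
--     else:
--       frames.pop()
--       if frames:
--         stack.pop()
--   return out
-- ===== Notes on version B (the rewrite author's own statement) =====
-- stated objective: alternative
-- what changed: The recursive DFS is replaced by an iterative loop over an explicit work-stack of (children-list, index) frames that advances the top frame, snapshots the path stack per edge, and pops frames when exhausted; seq_set is grown by appending to one output list instead of repeated list concatenation.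
import Mathlib
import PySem

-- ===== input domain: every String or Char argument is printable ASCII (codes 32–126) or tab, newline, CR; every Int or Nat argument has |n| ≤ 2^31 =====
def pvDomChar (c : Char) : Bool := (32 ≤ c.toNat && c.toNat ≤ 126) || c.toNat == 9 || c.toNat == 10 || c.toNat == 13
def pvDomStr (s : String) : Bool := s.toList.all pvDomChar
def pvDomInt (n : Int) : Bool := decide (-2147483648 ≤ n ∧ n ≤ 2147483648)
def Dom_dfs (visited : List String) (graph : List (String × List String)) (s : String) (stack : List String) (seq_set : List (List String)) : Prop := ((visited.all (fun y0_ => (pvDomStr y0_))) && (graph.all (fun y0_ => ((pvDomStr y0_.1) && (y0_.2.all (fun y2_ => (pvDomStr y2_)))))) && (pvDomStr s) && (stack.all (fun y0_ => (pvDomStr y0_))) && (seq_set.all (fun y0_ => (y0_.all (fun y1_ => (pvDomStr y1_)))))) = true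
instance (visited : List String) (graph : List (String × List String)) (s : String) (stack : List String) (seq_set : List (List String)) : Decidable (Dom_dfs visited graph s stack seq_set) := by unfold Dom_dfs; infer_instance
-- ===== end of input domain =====

-- B rewrites the recursive DFS as an iterative loop over an explicit stack of (children, index)
-- frames (objective: alternative, same cost).  A mutates `visited` and `stack` in place (stack is
-- restored, visited grows); the equivalence proved here is about the RETURN value only (B performs
-- the same mutations in Python).

-- ===== PORT A =====
-- shared dict primitives: `s in graph` and `graph[s]` on the association list (first-match lookup)
def pvHas (graph : List (String × List String)) (s : String) : Bool :=
  (List.lookup s graph).isSome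

def pvLook (graph : List (String × List String)) (s : String) : List String :=
  (List.lookup s graph).getD []

-- termination measure: number of graph keys not yet in `visited`
def pvUnvis (graph : List (String × List String)) (visited : List String) : Nat :=
  ((graph.map Prod.fst).filter (fun x => !visited.contains x)).length

theorem pvHas_mem_keys (graph : List (String × List String)) (s : String)
    (h : pvHas graph s = true) : s ∈ graph.map Prod.fst := by
  induction graph with
  | nil => simp [pvHas, List.lookup] at h
  | cons p rest ih =>
    obtain ⟨k, vs⟩ := p
    by_cases hks : (s == k) = true
    · simp only [List.map_cons, List.mem_cons]
      exact Or.inl (eq_of_beq hks)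
    · rw [pvHas, List.lookup] at h
      simp only [hks] at h
      exact List.mem_cons_of_mem _ (ih h)

theorem pvUnvis_mono (graph : List (String × List String)) {v v' : List String}
    (h : ∀ x, x ∈ v → x ∈ v') : pvUnvis graph v' ≤ pvUnvis graph v := by
  apply List.Sublist.length_le
  apply List.monotone_filter_right
  intro a ha
  simp only [Bool.not_eq_eq_eq_not, Bool.not_true, List.contains_eq_mem, decide_eq_false_iff_not] at *
  exact fun hm => ha (h a hm)

theorem pvUnvis_lt (graph : List (String × List String)) {v : List String} {c : String}
    (hk : c ∈ graph.map Prod.fst) (hv : c ∉ v) :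
    pvUnvis graph (v ++ [c]) < pvUnvis graph v := by
  have hsub : ((graph.map Prod.fst).filter (fun x => !(v ++ [c]).contains x)).Sublist
      ((graph.map Prod.fst).filter (fun x => !v.contains x)) := by
    apply List.monotone_filter_right
    intro a ha
    simp only [Bool.not_eq_eq_eq_not, Bool.not_true, List.contains_eq_mem,
      decide_eq_false_iff_not, List.mem_append] at *
    exact fun hm => ha (Or.inl hm)
  refine Nat.lt_of_le_of_ne (hsub.length_le) (fun heq => ?_)
  have hEq := hsub.eq_of_length heq
  have hc1 : c ∈ (graph.map Prod.fst).filter (fun x => !v.contains x) := by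
    simp only [List.mem_filter, Bool.not_eq_eq_eq_not, Bool.not_true, List.contains_eq_mem,
      decide_eq_false_iff_not]
    exact ⟨hk, hv⟩
  rw [← hEq] at hc1
  simp [List.mem_filter] at hc1

-- A's recursion: process the remaining children of the current node; descending into an unvisited
-- in-graph child inlines the recursive dfs call (guard true, append to visited, loop its children).
-- The value carries the proof that `visited` only grows, which the termination argument needs.
def goA (graph : List (String × List String)) (visited : List String)
    (children : List String) (stack : List String) (seq : List (List String)) :
    {p : List String × List (List String) // ∀ x, x ∈ visited → x ∈ p.1} :=
  match children with
  | [] => ⟨(visited, seq), fun _ h => h⟩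
  | c :: cs =>
    let stack' := stack ++ [c]
    let seq' := seq ++ [stack']
    if h : (!visited.contains c && pvHas graph c) = true then
      let r1 := goA graph (visited ++ [c]) (pvLook graph c) stack' seq'  -- h is used by decreasing_by
      let r2 := goA graph r1.1.1 cs stack r1.1.2
      ⟨r2.1, fun x hx => r2.2 x (r1.2 x (List.mem_append_left _ hx))⟩
    else
      let r := goA graph visited cs stack seq'
      ⟨r.1, r.2⟩
termination_by (pvUnvis graph visited, children.length)
decreasing_by
  · apply Prod.Lex.left
    simp only [Bool.and_eq_true, Bool.not_eq_eq_eq_not, Bool.not_true, List.contains_eq_mem,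
      decide_eq_false_iff_not] at h
    exact pvUnvis_lt graph (pvHas_mem_keys graph c h.2) h.1
  · have hle : pvUnvis graph r1.1.1 ≤ pvUnvis graph visited :=
      pvUnvis_mono graph (fun x hx => r1.2 x (List.mem_append_left _ hx))
    rcases Nat.lt_or_eq_of_le hle with hlt | heq
    · exact Prod.Lex.left _ _ hlt
    · rw [heq]; exact Prod.Lex.right _ (by simp)
  · apply Prod.Lex.right
    simp

def dfs (visited : List String) (graph : List (String × List String)) (s : String)
    (stack : List String) (seq_set : List (List String)) : List (List String) :=
  if pvHas graph s then (goA graph (visited ++ [s]) (pvLook graph s) stack seq_set).1.2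
  else seq_set

-- ===== PORT B =====
-- work of the frame stack, used only for termination of the loop
def pvWork (frames : List (List String × Nat)) : Nat :=
  frames.foldr (fun f acc => acc + (f.1.length + 1 - f.2) + 1) 0

-- B's while-loop: frames hold (children-list, next index); top frame is the head.
def runB (graph : List (String × List String)) (visited : List String)
    (stack : List String) (out : List (List String))
    (frames : List (List String × Nat)) : List (List String) :=
  match frames with
  | [] => out
  | (ch, i) :: rest =>
    if hi : i < ch.length then
      let c := ch[i]
      let stack' := stack ++ [c]
      let out' := out ++ [stack']
      if (!visited.contains c && pvHas graph c) = true then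
        runB graph (visited ++ [c]) stack' out' ((pvLook graph c, 0) :: (ch, i + 1) :: rest)
      else
        runB graph visited stack out' ((ch, i + 1) :: rest)
    else
      match rest with
      | [] => out
      | f :: rest' => runB graph visited stack.dropLast out (f :: rest')
termination_by (pvUnvis graph visited, pvWork frames)
decreasing_by
  · apply Prod.Lex.left
    rename_i h
    simp only [Bool.and_eq_true, Bool.not_eq_eq_eq_not, Bool.not_true, List.contains_eq_mem,
      decide_eq_false_iff_not] at h
    exact pvUnvis_lt graph (pvHas_mem_keys graph c h.2) h.1
  · apply Prod.Lex.right
    simp only [pvWork, List.foldr_cons]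
    omega
  · apply Prod.Lex.right
    simp only [pvWork, List.foldr_cons]
    omega

def dfs_alt (visited : List String) (graph : List (String × List String)) (s : String)
    (stack : List String) (seq_set : List (List String)) : List (List String) :=
  if pvHas graph s then
    runB graph (visited ++ [s]) stack seq_set [(pvLook graph s, 0)]
  else seq_set

-- ===== PRECONDITION & SPEC =====
def Spec_dfs (visited : List String) (graph : List (String × List String)) (s : String) (stack : List String) (seq_set : List (List String)) (out : List (List String)) : Prop := out = dfs_alt visited graph s stack seq_set
instance (visited : List String) (graph : List (String × List String)) (s : String) (stack : List String) (seq_set : List (List String)) (out : List (List String)) : Decidable (Spec_dfs visited graph s stack seq_set out) := by unfold Spec_dfs; infer_instance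

-- ===== CLAIM (what is proved, stated in full; the proofs are below) =====
def Claim_equal_dfs : Prop := ∀ (visited : List String) (graph : List (String × List String)) (s : String) (stack : List String) (seq_set : List (List String)), Dom_dfs visited graph s stack seq_set → Spec_dfs visited graph s stack seq_set (dfs visited graph s stack seq_set)

-- ===== LEMMAS AND PROOFS =====

-- what the machine does after the current frame is finished
def pvCont (graph : List (String × List String)) (stack : List String)
    (rest : List (List String × Nat)) (p : List String × List (List String)) :
    List (List String) :=
  match rest with
  | [] => p.2
  | _ :: _ => runB graph p.1 stack.dropLast p.2 rest

-- simulation: running the machine from a frame (ch, i) whose remaining children are `children`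
-- first performs exactly A's child loop, then continues with the rest of the frames
theorem runB_goA (graph : List (String × List String)) (visited : List String)
    (children : List String) (stack : List String) (out : List (List String)) :
    ∀ (ch : List String) (i : Nat) (rest : List (List String × Nat)), ch.drop i = children →
      runB graph visited stack out ((ch, i) :: rest)
        = pvCont graph stack rest (goA graph visited children stack out).1 := by
  induction visited, children, stack, out using goA.induct graph with
  | case1 visited stack seq =>
    intro ch i rest hdrop
    have hge : ¬ i < ch.length := by
      have := List.drop_eq_nil_iff.mp hdrop
      omega
    rw [runB.eq_def, goA]
    simp only [hge, dif_neg, not_false_iff]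
    cases rest with
    | nil => rfl
    | cons f rest' => rfl
  | case2 visited stack seq c cs stack' seq' h r1 ih1L ih1 ih2L ih2 =>
    intro ch i rest hdrop
    have hlt : i < ch.length := by
      have := congrArg List.length hdrop
      simp [List.length_drop] at this
      omega
    have hget : ch[i] = c := by
      have h0 : (ch.drop i)[0]? = some c := by rw [hdrop]; rfl
      rw [List.getElem?_drop] at h0
      have := List.getElem?_eq_getElem (l := ch) (i := i + 0) (by omega)
      rw [this] at h0
      simpa using h0
    have hdrop' : ch.drop (i + 1) = cs := by
      have h1 : (ch.drop i).drop 1 = cs := by rw [hdrop]; rfl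
      rw [List.drop_drop] at h1
      simpa [Nat.add_comm] using h1
    rw [runB.eq_def]
    simp only [hlt, dif_pos, hget, h, if_pos]
    rw [ih1 (pvLook graph c) 0 ((ch, i + 1) :: rest) rfl]
    rw [pvCont]
    have hdl : (stack ++ [c]).dropLast = stack := by simp
    rw [hdl]
    rw [ih2 ch (i + 1) rest hdrop']
    rw [goA]
    have hp : c ∉ visited ∧ pvHas graph c = true := by simpa using h
    simp [hp]
  | case3 visited stack seq c cs stack' seq' h ihL ih =>
    intro ch i rest hdrop
    have hlt : i < ch.length := by
      have := congrArg List.length hdrop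
      simp [List.length_drop] at this
      omega
    have hget : ch[i] = c := by
      have h0 : (ch.drop i)[0]? = some c := by rw [hdrop]; rfl
      rw [List.getElem?_drop] at h0
      have := List.getElem?_eq_getElem (l := ch) (i := i + 0) (by omega)
      rw [this] at h0
      simpa using h0
    have hdrop' : ch.drop (i + 1) = cs := by
      have h1 : (ch.drop i).drop 1 = cs := by rw [hdrop]; rfl
      rw [List.drop_drop] at h1
      simpa [Nat.add_comm] using h1
    rw [runB.eq_def]
    simp only [hlt, dif_pos, hget, h]
    rw [ih ch (i + 1) rest hdrop']
    rw [goA]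
    have hp : ¬(c ∉ visited ∧ pvHas graph c = true) := by simpa using h
    simp [hp]

-- ===== VERDICT (by name: the statement is the Claim_ definition above) =====
theorem dfs_spec : Claim_equal_dfs := by
  intro visited graph s stack seq_set _
  unfold Spec_dfs dfs dfs_alt
  by_cases hs : pvHas graph s = true
  · simp only [hs, if_pos]
    rw [runB_goA graph (visited ++ [s]) (pvLook graph s) stack seq_set (pvLook graph s) 0 [] rfl]
    rfl
  · simp [hs]
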